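-- pv_equiv track=rewrite | github.com/niftynans/matched_CFR | get_results.py | closest_indices_cattaneo
-- ===== SOURCE A (Python) =====
-- import heapq
--
-- def closest_indices_cattaneo(lst, range_min, range_max, n):
--     def distance_from_range(value):
--         if value < range_min:
--             return range_min - value
--         elif value > range_max:
--             return value - range_max
--         else:
--             return 0
--     distances = [(distance_from_range(value), index) for index, value in enumerate(lst)]
--     closest_n = heapq.nsmallest(n, distances)
--     result_indices = [index for _, index in closest_n]
--     return result_indices
-- ===== SOURCE B (Python) =====
-- def closest_indices_cattaneo(lst, range_min, range_max, n):
--     def distance_from_range(value):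
--         if value < range_min:
--             return range_min - value
--         elif value > range_max:
--             return value - range_max
--         else:
--             return 0
--     if n <= 0:
--         return []
--     order = sorted(range(len(lst)), key=lambda i: (distance_from_range(lst[i]), i))
--     return order[:n]
-- ===== Notes on version B (the rewrite author's own statement) =====
-- stated objective: simpler
-- what changed: Instead of materialising a (distance, index) pair list and running heapq.nsmallest over it, B sorts the indices directly with key (distance, index) and takes the first n, guarding n <= 0 to match nsmallest's empty result.
import Mathlib
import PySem

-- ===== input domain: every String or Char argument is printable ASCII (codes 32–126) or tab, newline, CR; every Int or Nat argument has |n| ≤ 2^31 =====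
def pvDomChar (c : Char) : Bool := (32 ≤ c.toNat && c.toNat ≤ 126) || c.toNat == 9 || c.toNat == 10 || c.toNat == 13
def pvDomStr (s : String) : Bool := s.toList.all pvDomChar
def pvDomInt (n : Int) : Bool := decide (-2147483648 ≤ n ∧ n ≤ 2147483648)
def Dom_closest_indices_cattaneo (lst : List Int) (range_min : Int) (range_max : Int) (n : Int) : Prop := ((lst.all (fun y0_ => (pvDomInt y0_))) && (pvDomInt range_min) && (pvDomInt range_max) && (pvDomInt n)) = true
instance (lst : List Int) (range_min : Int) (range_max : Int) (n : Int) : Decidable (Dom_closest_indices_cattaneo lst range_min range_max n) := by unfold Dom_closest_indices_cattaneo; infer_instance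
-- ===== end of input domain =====

-- B replaces the (distance,index)-pair list plus heapq.nsmallest with a direct sort of the
-- indices by the key (distance, index) followed by taking the first n; same cost, simpler.

-- shared helper: the nested distance_from_range, identical in both Pythons
def cattaneoDist (range_min range_max value : Int) : Int :=
  if value < range_min then range_min - value
  else if value > range_max then value - range_max
  else 0

-- ===== PORT A =====
-- heapq.nsmallest(n, xs) is ported as its documented meaning sorted(xs)[:n] (empty for n ≤ 0);
-- tuple comparison on (distance, index) pairs is PySem.List.sorted2 with the two projections.
def closest_indices_cattaneo (lst : List Int) (range_min : Int) (range_max : Int) (n : Int) : List Int :=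
  let distances := (PySem.List.enumerate lst).map (fun p => (cattaneoDist range_min range_max p.2, p.1))
  let closest_n := (PySem.List.sorted2 distances (fun p => p.1) (fun p => p.2)).take n.toNat
  closest_n.map (fun p => p.2)

-- ===== PORT B =====
def closest_indices_cattaneo_alt (lst : List Int) (range_min : Int) (range_max : Int) (n : Int) : List Int :=
  if n ≤ 0 then []
  else
    let order := PySem.List.sorted2 (PySem.List.pyRange 0 lst.length 1)
      (fun i => cattaneoDist range_min range_max (PySem.List.pyGetD lst i 0)) (fun i => i)
    order.take n.toNat

-- ===== PRECONDITION & SPEC =====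
def Spec_closest_indices_cattaneo (lst : List Int) (range_min : Int) (range_max : Int) (n : Int) (out : List Int) : Prop := out = closest_indices_cattaneo_alt lst range_min range_max n
instance (lst : List Int) (range_min : Int) (range_max : Int) (n : Int) (out : List Int) : Decidable (Spec_closest_indices_cattaneo lst range_min range_max n out) := by unfold Spec_closest_indices_cattaneo; infer_instance

-- ===== CLAIM (what is proved, stated in full; the proofs are below) =====
def Claim_equal_closest_indices_cattaneo : Prop := ∀ (lst : List Int) (range_min : Int) (range_max : Int) (n : Int), Dom_closest_indices_cattaneo lst range_min range_max n → Spec_closest_indices_cattaneo lst range_min range_max n (closest_indices_cattaneo lst range_min range_max n)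

-- ===== LEMMAS AND PROOFS =====

theorem insertBy_map {α β : Type} (f : α → β) (bf : β → β → Bool) (x : α) (ys : List α) :
    PySem.List.insertBy bf (f x) (ys.map f)
      = (PySem.List.insertBy (fun a b => bf (f a) (f b)) x ys).map f := by
  induction ys with
  | nil => simp [PySem.List.insertBy]
  | cons y ys ih =>
      simp only [List.map_cons, PySem.List.insertBy]
      by_cases h : bf (f x) (f y) = true <;> simp [h, ih]

theorem foldl_insertBy_map {α β : Type} (f : α → β) (bf : β → β → Bool) :
    ∀ (xs acc : List α),
      List.foldl (fun acc x => PySem.List.insertBy bf x acc) (acc.map f) (xs.map f)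
        = (List.foldl (fun acc x => PySem.List.insertBy (fun a b => bf (f a) (f b)) x acc) acc xs).map f := by
  intro xs
  induction xs with
  | nil => intro acc; simp
  | cons x xs ih =>
      intro acc
      simp only [List.map_cons, List.foldl_cons]
      rw [insertBy_map f bf x acc]
      exact ih _

theorem sorted2_map {α β κ₁ κ₂ : Type} [LinearOrder κ₁] [LinearOrder κ₂]
    (f : α → β) (xs : List α) (k1 : β → κ₁) (k2 : β → κ₂) :
    PySem.List.sorted2 (xs.map f) k1 k2
      = (PySem.List.sorted2 xs (fun a => k1 (f a)) (fun a => k2 (f a))).map f := by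
  unfold PySem.List.sorted2
  simpa using
    foldl_insertBy_map f
      (fun a b => decide (k1 a < k1 b) || !decide (k1 b < k1 a) && decide (k2 a < k2 b)) xs []

-- ===== VERDICT (by name: the statement is the Claim_ definition above) =====
theorem closest_indices_cattaneo_spec : Claim_equal_closest_indices_cattaneo := by
  intro lst range_min range_max n _
  unfold Spec_closest_indices_cattaneo closest_indices_cattaneo closest_indices_cattaneo_alt
  by_cases hn : n ≤ 0
  · have : n.toNat = 0 := Int.toNat_of_nonpos hn
    simp [hn, this]
  · rw [PySem.List.enumerate_eq_map_pyRange (d := 0), List.map_map]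
    simp only [Function.comp_def]
    rw [sorted2_map (fun j => (cattaneoDist range_min range_max (PySem.List.pyGetD lst j 0), j))]
    simp [hn, List.map_take, List.map_map, Function.comp_def]
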